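-- pv_equiv track=rewrite | github.com/ctrlaltwilso/python-challenges | nested-loop-challenges/odd_char_count.py | odd_char_count
-- ===== SOURCE A (Python) =====
-- def odd_char_count(sentence):
--     final_output = []
--     words = sentence.split()
--
--     for word in words:
--         counts = {}
--         if len(word) % 2 > 0:
--             for char in word:
--                 c = char.lower()
--                 if c in counts:
--                     counts[c] += 1
--                 else:
--                     counts[c] = 1
--
--             max_val = max(counts.values())
--
--             for char in word:
--                 c = char.lower()
--                 if counts[c] == max_val:
--                     final_output.append(c)
--                     break
--
--     return ''.join(final_output)
-- ===== SOURCE B (Python) =====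
-- def _best(word):
--     # stats: lowercased char -> (count, index of its first occurrence), built in one enumerate pass
--     stats = {}
--     for i, ch in enumerate(word.lower()):
--         if ch in stats:
--             cnt, first = stats[ch]
--             stats[ch] = (cnt + 1, first)
--         else:
--             stats[ch] = (1, i)
--     # unique lexicographic minimum: highest count, earliest first occurrence
--     return min(stats.items(), key=lambda kv: (-kv[1][0], kv[1][1]))[0]
--
-- def odd_char_count(sentence):
--     return ''.join(_best(w) for w in sentence.split() if len(w) % 2)
-- ===== Notes on version B (the rewrite author's own statement) =====
-- stated objective: alternative
-- what changed: Per word B builds (count, first-occurrence-index) pairs in a single enumerate pass and selects the answer as the unique lexicographic minimum of (-count, first_index) over the distinct chars, replacing A's max over counts.values() followed by a second break-loop rescan of the word; correct because A's first-maximal-char rule is exactly the highest-count char with the earliest first occurrence.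
import Mathlib
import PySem

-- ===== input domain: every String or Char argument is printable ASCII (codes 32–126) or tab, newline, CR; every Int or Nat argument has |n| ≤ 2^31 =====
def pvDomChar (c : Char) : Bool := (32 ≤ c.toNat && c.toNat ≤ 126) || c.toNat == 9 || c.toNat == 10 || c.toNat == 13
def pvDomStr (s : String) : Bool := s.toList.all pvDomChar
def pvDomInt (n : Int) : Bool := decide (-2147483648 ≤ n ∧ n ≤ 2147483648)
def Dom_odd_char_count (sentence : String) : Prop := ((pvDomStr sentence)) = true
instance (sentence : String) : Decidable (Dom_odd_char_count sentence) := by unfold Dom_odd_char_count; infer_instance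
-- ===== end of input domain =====

-- B replaces A's max-over-counts.values plus break-loop rescan by one enumerate pass building
-- (count, first-occurrence-index) per char and a single lexicographic-minimum selection; objective: alternative.


-- ===== PORT A =====
-- A's inner dict build: counts[c.lower()] += 1 / = 1

def countsA (word : List Char) : PySem.Dict Char Int :=
  word.foldl (fun d ch =>
    let c := PySem.Chars.lowerChar ch
    if d.contains c then d.modify c 0 (· + 1) else d.insert c 1) PySem.Dict.empty

-- body of A's outer loop: the odd-length test, max(counts.values()), and the break-loop
-- appending the first lowercased char whose count equals max_val
def oddWordA (acc : List Char) (word : List Char) : List Char :=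
  if PySem.Chars.len word % 2 > 0 then
    let counts := countsA word
    match PySem.List.max? counts.values id with
    | none => acc
    | some max_val =>
      match word.find? (fun ch => counts.getD (PySem.Chars.lowerChar ch) 0 == max_val) with
      | some ch => acc ++ [PySem.Chars.lowerChar ch]
      | none => acc
  else acc

def odd_char_count (sentence : String) : String :=
  String.ofList ((PySem.Chars.split₀ sentence.toList).foldl oddWordA [])

-- ===== PORT B =====
-- Source B _best: one pass over enumerate(word.lower()) building stats[ch] = (count, first index) …
def statsStep (d : PySem.Dict Char (Int × Int)) (p : Int × Char) : PySem.Dict Char (Int × Int) :=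
  match d.get? p.2 with
  | some q => d.insert p.2 (q.1 + 1, q.2)   -- ch in stats: cnt, first = stats[ch]; stats[ch] = (cnt+1, first)
  | none   => d.insert p.2 (1, p.1)         -- else: stats[ch] = (1, i)

def statsB (word : List Char) : PySem.Dict Char (Int × Int) :=
  (PySem.List.enumerate (PySem.Chars.lower word) 0).foldl statsStep PySem.Dict.empty

-- … then min(stats.items(), key=lambda kv: (-kv[1][0], kv[1][1]))[0]
def bestB (word : List Char) : Option Char :=
  (PySem.List.min2? (statsB word).items (fun kv => -kv.2.1) (fun kv => kv.2.2)).map (·.1)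

-- ''.join(_best(w) for w in sentence.split() if len(w) % 2)
def odd_char_count_alt (sentence : String) : String :=
  String.ofList (((PySem.Chars.split₀ sentence.toList).filter
    (fun w => PySem.Chars.len w % 2 != 0)).filterMap bestB)

-- ===== PRECONDITION & SPEC =====
def Spec_odd_char_count (sentence : String) (out : String) : Prop := out = odd_char_count_alt sentence
instance (sentence : String) (out : String) : Decidable (Spec_odd_char_count sentence out) := by unfold Spec_odd_char_count; infer_instance

-- ===== CLAIM (what is proved, stated in full; the proofs are below) =====
def Claim_equal_odd_char_count : Prop := ∀ (sentence : String), Dom_odd_char_count sentence → Spec_odd_char_count sentence (odd_char_count sentence)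

-- ===== LEMMAS AND PROOFS =====

-- ---------- A-side: the per-word pick is max? over the lowered word keyed by count ----------

lemma stepA_eq (d : PySem.Dict Char Int) (c : Char) :
    (if d.contains c then d.modify c 0 (· + 1) else d.insert c 1) = d.modify c 0 (· + 1) := by
  by_cases h : d.contains c
  · simp [h]
  · simp [h, PySem.Dict.modify, PySem.Dict.getD_of_not_contains d (0:Int) (by simpa using h)]

lemma countsA_eq (word : List Char) :
    countsA word = (PySem.Chars.lower word).foldl
      (fun d c => d.modify c 0 (· + 1)) PySem.Dict.empty := by
  unfold countsA
  rw [PySem.Chars.lower, List.foldl_map]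
  congr 1
  funext d ch
  exact stepA_eq d (PySem.Chars.lowerChar ch)

lemma countsA_getD (word : List Char) (c : Char) :
    (countsA word).getD c 0 = ((PySem.Chars.lower word).count c : Int) := by
  rw [countsA_eq]
  simpa using PySem.Dict.getD_foldl_modify_add_one (PySem.Chars.lower word) PySem.Dict.empty c

lemma countsA_keys (word : List Char) :
    (countsA word).keys = PySem.Set.ofList (PySem.Chars.lower word) := by
  rw [countsA_eq]
  rw [PySem.Dict.keys_foldl_modify (PySem.Chars.lower word) 0 (fun _ _ => (· + 1)) PySem.Dict.empty]
  simp [PySem.Set.ofList, PySem.Set.update, PySem.Set.empty, PySem.Dict.keys_empty]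

lemma countsA_values (word : List Char) :
    (countsA word).values =
      (PySem.Set.ofList (PySem.Chars.lower word)).map
        (fun c => ((PySem.Chars.lower word).count c : Int)) := by
  have hnd : (countsA word).keys.Nodup := by
    rw [countsA_keys]; exact PySem.Set.nodup_ofList _
  rw [PySem.Dict.values_eq_map_keys (countsA word) hnd 0, countsA_keys]
  exact List.map_congr_left (fun c _ => countsA_getD word c)

lemma max?_cons_cons (key : Char → Nat) (x y : Char) (xs : List Char) :
    PySem.List.max? (x :: y :: xs) key =
    PySem.List.max? ((if key x < key y then y else x) :: xs) key := by
  simp only [PySem.List.max?, List.foldl_cons]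
  split_ifs <;> rfl

lemma max?_cons (key : Char → Nat) :
    ∀ (xs : List Char) (x : Char),
      PySem.List.max? (x :: xs) key =
      some (match PySem.List.max? xs key with
        | none => x
        | some m' => if key x < key m' then m' else x) := by
  intro xs
  induction xs with
  | nil => intro x; rfl
  | cons y xs ih =>
    intro x
    rw [max?_cons_cons, ih, ih y]
    cases hmx : PySem.List.max? xs key with
    | none => rfl
    | some m' =>
      simp only []
      split_ifs <;> first | rfl | (exfalso; omega)

lemma max?_first (key : Char → Nat) :
    ∀ (xs : List Char) (m : Char), PySem.List.max? xs key = some m →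
      ∃ l1 l2, xs = l1 ++ m :: l2 ∧ ∀ y ∈ l1, key y < key m := by
  intro xs
  induction xs with
  | nil => intro m h; simp [PySem.List.max?] at h
  | cons x xs ih =>
    intro m h
    rw [max?_cons] at h
    cases hmx : PySem.List.max? xs key with
    | none =>
      rw [hmx] at h
      simp only [Option.some.injEq] at h
      exact ⟨[], xs, by simp [h], by simp⟩
    | some m' =>
      rw [hmx] at h
      simp only [Option.some.injEq] at h
      by_cases hk : key x < key m'
      · rw [if_pos hk] at h
        subst h
        obtain ⟨l1, l2, hxs, hlt⟩ := ih m' hmx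
        exact ⟨x :: l1, l2, by simp [hxs], by
          intro y hy
          rcases List.mem_cons.mp hy with rfl | hy
          · exact hk
          · exact hlt y hy⟩
      · rw [if_neg hk] at h
        exact ⟨[], xs, by simp [h], by simp⟩

lemma find?_count_max (L : List Char) (m : Char)
    (hm : PySem.List.max? L (fun c => L.count c) = some m) :
    L.find? (fun c => ((L.count c : Int)) == ((L.count m : Int))) = some m := by
  obtain ⟨l1, l2, hxs, hlt⟩ := max?_first (fun c => L.count c) L m hm
  have key : ∀ (cnt : Char → Nat), (∀ y ∈ l1, cnt y < cnt m) →
      List.find? (fun c => ((cnt c : Int)) == ((cnt m : Int))) (l1 ++ m :: l2) = some m := by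
    intro cnt hl
    rw [List.find?_append]
    have h1 : List.find? (fun c => ((cnt c : Int)) == ((cnt m : Int))) l1 = none := by
      rw [List.find?_eq_none]
      intro y hy
      have := hl y hy
      simp only [beq_iff_eq]
      intro hc
      omega
    rw [h1]
    simp
  rw [hxs] at hlt ⊢
  exact key _ hlt

lemma word_eq (acc : List Char) (word : List Char) :
    oddWordA acc word = acc ++
      (if PySem.Chars.len word % 2 != 0 then
        (PySem.List.max? (PySem.Chars.lower word)
          (fun c => (PySem.Chars.lower word).count c)).toList
       else []) := by
  have hlen : (PySem.Chars.lower word).length = word.length := by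
    rw [PySem.Chars.lower]; simp
  by_cases hodd : word.length % 2 = 1
  · -- odd-length word
    obtain ⟨m, hm⟩ : ∃ m, PySem.List.max? (PySem.Chars.lower word)
        (fun c => (PySem.Chars.lower word).count c) = some m := by
      cases h : PySem.List.max? (PySem.Chars.lower word)
          (fun c => (PySem.Chars.lower word).count c) with
      | none =>
        have h0 := (PySem.List.max?_eq_none_iff _ _).mp h
        rw [h0] at hlen
        simp at hlen
        omega
      | some m => exact ⟨m, rfl⟩
    have hmL : m ∈ PySem.Chars.lower word := PySem.List.max?_mem hm
    -- max over counts.values equals the count of m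
    have hMv : PySem.List.max? (countsA word).values id =
        some (((PySem.Chars.lower word).count m : Int)) := by
      rw [countsA_values]
      obtain ⟨M, hM⟩ : ∃ M, PySem.List.max? ((PySem.Set.ofList (PySem.Chars.lower word)).map
          (fun c => (((PySem.Chars.lower word).count c : Int)))) id = some M := by
        cases h : PySem.List.max? ((PySem.Set.ofList (PySem.Chars.lower word)).map
            (fun c => (((PySem.Chars.lower word).count c : Int)))) id with
        | none =>
          have h0 := (PySem.List.max?_eq_none_iff _ _).mp h
          rw [List.map_eq_nil_iff] at h0
          have hmem : m ∈ PySem.Set.ofList (PySem.Chars.lower word) :=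
            (PySem.Set.mem_ofList _ m).mpr hmL
          rw [h0] at hmem
          simp at hmem
        | some M => exact ⟨M, rfl⟩
      have hMmem := PySem.List.max?_mem hM
      obtain ⟨c0, hc0, hc0M⟩ := List.mem_map.mp hMmem
      have hc0L : c0 ∈ PySem.Chars.lower word := (PySem.Set.mem_ofList _ c0).mp hc0
      have h1 : (PySem.Chars.lower word).count c0 ≤ (PySem.Chars.lower word).count m :=
        PySem.List.max?_isMax hm c0 hc0L
      have h2 : (((PySem.Chars.lower word).count m : Int)) ∈
          (PySem.Set.ofList (PySem.Chars.lower word)).map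
            (fun c => (((PySem.Chars.lower word).count c : Int))) :=
        List.mem_map.mpr ⟨m, (PySem.Set.mem_ofList _ m).mpr hmL, rfl⟩
      have h3 := PySem.List.max?_isMax hM _ h2
      have h4 : M = (((PySem.Chars.lower word).count m : Int)) := by
        simp only [id] at h3
        omega
      rw [hM, h4]
    -- the break-loop finds the first char whose lowercased count is maximal
    have hfp := find?_count_max (PySem.Chars.lower word) m hm
    have hfw : (word.find? (fun ch => (((PySem.Chars.lower word).count
        (PySem.Chars.lowerChar ch) : Int)) ==
        (((PySem.Chars.lower word).count m : Int)))).map PySem.Chars.lowerChar = some m := by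
      refine Eq.trans ?_ hfp
      conv_rhs => rw [PySem.Chars.lower]
      rw [List.find?_map]
      rfl
    obtain ⟨ch', hch', hlow⟩ := Option.map_eq_some_iff.mp hfw
    -- assemble
    rw [oddWordA]
    rw [if_pos (by rw [PySem.Chars.len_eq]; omega)]
    simp only [hMv, countsA_getD, hch', hlow, hm]
    rw [if_pos (by simp [PySem.Chars.len_eq]; omega)]
    simp
  · -- even-length word: skipped on both sides
    have h0 : word.length % 2 = 0 := by omega
    rw [oddWordA]
    rw [if_neg (by rw [PySem.Chars.len_eq]; omega)]
    rw [if_neg (by simp [PySem.Chars.len_eq]; omega)]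
    simp

lemma main_fold : ∀ (ws : List (List Char)) (acc : List Char),
    ws.foldl oddWordA acc = acc ++
      (ws.filter (fun w => PySem.Chars.len w % 2 != 0)).filterMap
        (fun w => PySem.List.max? (PySem.Chars.lower w)
          (fun c => (PySem.Chars.lower w).count c)) := by
  intro ws
  induction ws with
  | nil => intro acc; simp
  | cons w ws ih =>
    intro acc
    rw [List.foldl_cons, ih, word_eq]
    by_cases h : PySem.Chars.len w % 2 != 0
    · simp only [List.filter_cons, h, if_pos, List.filterMap_cons]
      cases o : PySem.List.max? (PySem.Chars.lower w) (fun c => (PySem.Chars.lower w).count c) with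
      | none => simp
      | some c => simp
    · simp only [List.filter_cons, h]
      simp at h
      simp

-- ---------- B-side: characterising the stats dict ----------

def statsVal (d : PySem.Dict Char (Int × Int)) (p : Int × Char) : Int × Int :=
  match d.get? p.2 with
  | some q => (q.1 + 1, q.2)
  | none   => (1, p.1)

lemma statsStep_eq (d : PySem.Dict Char (Int × Int)) (p : Int × Char) :
    statsStep d p = d.insert p.2 (statsVal d p) := by
  unfold statsStep statsVal
  cases d.get? p.2 <;> rfl

lemma statsFold_get? : ∀ (L : List Char) (s : Int) (d : PySem.Dict Char (Int × Int)) (c : Char),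
    ((PySem.List.enumerate L s).foldl statsStep d).get? c =
      match d.get? c with
      | some q => some (q.1 + (L.count c : Int), q.2)
      | none => if c ∈ L then some ((L.count c : Int), s + (L.idxOf c : Int)) else none := by
  intro L
  induction L with
  | nil =>
    intro s d c
    simp only [PySem.List.enumerate_nil, List.foldl_nil, List.count_nil, List.not_mem_nil]
    cases h : d.get? c with
    | none => simp
    | some q => simp
  | cons x L ih =>
    intro s d c
    rw [PySem.List.enumerate_cons, List.foldl_cons, ih]
    by_cases hc : c = x
    · subst hc
      rw [statsStep_eq]
      cases hd : d.get? c with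
      | some q =>
        rw [show statsVal d (s, c) = (q.1 + 1, q.2) by simp [statsVal, hd]]
        rw [PySem.Dict.get?_insert_self]
        simp only [List.count_cons_self]
        push_cast
        ring_nf
      | none =>
        rw [show statsVal d (s, c) = (1, s) by simp [statsVal, hd]]
        rw [PySem.Dict.get?_insert_self]
        simp only [List.count_cons_self, List.mem_cons, true_or, if_pos,
          List.idxOf_cons_self]
        push_cast
        simp [add_comm]
    · rw [statsStep_eq]
      have hx2 : (d.insert ((s, x) : Int × Char).2 (statsVal d (s, x))).get? c = d.get? c :=
        PySem.Dict.get?_insert_of_ne d _ (fun h => hc (by simpa using h))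
      rw [hx2]
      have hcount : (x :: L).count c = L.count c := by
        simp [show x ≠ c from fun h => hc h.symm]
      cases hd : d.get? c with
      | some q => simp [hcount]
      | none =>
        simp only [hcount, List.mem_cons, hc, false_or]
        by_cases hm : c ∈ L
        · rw [if_pos hm, if_pos hm, List.idxOf_cons_ne _ (Ne.symm hc)]
          push_cast
          ring_nf
        · rw [if_neg hm, if_neg hm]

lemma statsB_get? (word : List Char) (c : Char) (hc : c ∈ PySem.Chars.lower word) :
    (statsB word).get? c =
      some (((PySem.Chars.lower word).count c : Int),
            ((PySem.Chars.lower word).idxOf c : Int)) := by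
  unfold statsB
  rw [statsFold_get?]
  simp [PySem.Dict.get?_empty, hc]

lemma statsB_keys (word : List Char) :
    (statsB word).keys = PySem.Set.ofList (PySem.Chars.lower word) := by
  unfold statsB
  rw [show (List.foldl statsStep PySem.Dict.empty
        (PySem.List.enumerate (PySem.Chars.lower word) 0)) =
      List.foldl (fun d p => d.insert p.2 (statsVal d p)) PySem.Dict.empty
        (PySem.List.enumerate (PySem.Chars.lower word) 0) by
    congr 1; funext d p; exact statsStep_eq d p]
  rw [PySem.Dict.keys_foldl_insert_key _ (fun p : Int × Char => p.2) _ _]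
  rw [PySem.List.map_snd_enumerate]
  simp [PySem.Set.ofList, PySem.Set.update, PySem.Set.empty, PySem.Dict.keys_empty]

lemma statsB_nodup (word : List Char) : (statsB word).keys.Nodup := by
  rw [statsB_keys]; exact PySem.Set.nodup_ofList _

lemma statsB_items (word : List Char) :
    (statsB word).items =
      (PySem.Set.ofList (PySem.Chars.lower word)).map
        (fun c => (c, (((PySem.Chars.lower word).count c : Int),
                       ((PySem.Chars.lower word).idxOf c : Int)))) := by
  rw [PySem.Dict.items_eq_map_keys (statsB word) (statsB_nodup word) ((0 : Int), (0 : Int)),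
    statsB_keys]
  refine List.map_congr_left (fun c hc => ?_)
  have hcL : c ∈ PySem.Chars.lower word := (PySem.Set.mem_ofList _ c).mp hc
  rw [PySem.Dict.getD_of_get?_eq_some _ _ (statsB_get? word c hcL)]

-- ---------- the lexicographic minimum fold ----------

-- strict lexicographic order on the (−count, first-index) keys
def LexLt {α : Type} (k1 k2 : α → Int) (m x : α) : Prop :=
  k1 m < k1 x ∨ (k1 m = k1 x ∧ k2 m < k2 x)

-- the step function of PySem.List.min2? (Python min with a 2-tuple key), named for the proofs
def minF {α : Type} (k1 k2 : α → Int) (acc : Option α) (x : α) : Option α :=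
  match acc with
  | none => some x
  | some b =>
    if (decide (k1 x < k1 b) || !decide (k1 b < k1 x) && decide (k2 x < k2 b)) = true
    then some x else some b

lemma minF_none {α : Type} (k1 k2 : α → Int) (x : α) : minF k1 k2 none x = some x := rfl

lemma minF_some {α : Type} (k1 k2 : α → Int) (b x : α) :
    minF k1 k2 (some b) x =
      if (decide (k1 x < k1 b) || !decide (k1 b < k1 x) && decide (k2 x < k2 b)) = true
      then some x else some b := rfl

lemma min2?_eq_foldl_minF {α : Type} (k1 k2 : α → Int) (xs : List α) :
    PySem.List.min2? xs k1 k2 = xs.foldl (minF k1 k2) none := rfl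

lemma min2_keep {α : Type} (k1 k2 : α → Int) (m : α) :
    ∀ (v : List α), (∀ x ∈ v, LexLt k1 k2 m x) →
      v.foldl (minF k1 k2) (some m) = some m := by
  intro v
  induction v with
  | nil => intro _; rfl
  | cons x v ih =>
    intro hv
    have hx := hv x (List.mem_cons_self)
    rw [List.foldl_cons]
    have hcond : (decide (k1 x < k1 m) || !decide (k1 m < k1 x) && decide (k2 x < k2 m)) = false := by
      rcases hx with h | ⟨h1, h2⟩
      · simp [not_lt.mpr (le_of_lt h), h]
      · simp [h1, not_lt.mpr (le_of_lt h2)]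
    rw [minF_some, if_neg (by simp [hcond])]
    exact ih (fun y hy => hv y (List.mem_cons_of_mem _ hy))

lemma min2_prefix {α : Type} (k1 k2 : α → Int) (m : α) :
    ∀ (u : List α), (∀ x ∈ u, LexLt k1 k2 m x) →
      ∀ (acc : Option α), (acc = none ∨ ∃ a, acc = some a ∧ LexLt k1 k2 m a) →
      (u.foldl (minF k1 k2) acc = none ∨
       ∃ a, u.foldl (minF k1 k2) acc = some a ∧ LexLt k1 k2 m a) := by
  intro u
  induction u with
  | nil => intro _ acc hacc; simpa using hacc
  | cons x u ih =>
    intro hu acc hacc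
    have hx := hu x (List.mem_cons_self)
    rw [List.foldl_cons]
    refine ih (fun y hy => hu y (List.mem_cons_of_mem _ hy)) _ ?_
    rcases hacc with rfl | ⟨a, rfl, ha⟩
    · exact Or.inr ⟨x, rfl, hx⟩
    · rw [minF_some]
      split_ifs with h
      · exact Or.inr ⟨x, rfl, hx⟩
      · exact Or.inr ⟨a, rfl, ha⟩

lemma min2?_split {α : Type} (k1 k2 : α → Int) (u v : List α) (m : α)
    (hu : ∀ x ∈ u, LexLt k1 k2 m x) (hv : ∀ x ∈ v, LexLt k1 k2 m x) :
    PySem.List.min2? (u ++ m :: v) k1 k2 = some m := by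
  rw [min2?_eq_foldl_minF, List.foldl_append, List.foldl_cons]
  rcases min2_prefix k1 k2 m u hu none (Or.inl rfl) with h | ⟨a, h, ha⟩
  · rw [h, minF_none]
    exact min2_keep k1 k2 m v hv
  · rw [h]
    have hcond : (decide (k1 m < k1 a) || !decide (k1 a < k1 m) && decide (k2 m < k2 a)) = true := by
      rcases ha with h1 | ⟨h1, h2⟩
      · simp [h1]
      · simp [h1, h2]
    rw [minF_some, if_pos hcond]
    exact min2_keep k1 k2 m v hv

-- ---------- the key fact: A's pick is the unique (−count, first-index) minimiser ----------

lemma key_fact (L : List Char) (m : Char)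
    (hm : PySem.List.max? L (fun c => L.count c) = some m) :
    ∀ c ∈ L, c ≠ m →
      L.count c < L.count m ∨ (L.count c = L.count m ∧ L.idxOf m < L.idxOf c) := by
  obtain ⟨l1, l2, hxs, hlt⟩ := max?_first (fun c => L.count c) L m hm
  intro c hcL hne
  have hle : L.count c ≤ L.count m := PySem.List.max?_isMax hm c hcL
  rcases lt_or_eq_of_le hle with h | h
  · exact Or.inl h
  · refine Or.inr ⟨h, ?_⟩
    have hm1 : m ∉ l1 := fun hmem => lt_irrefl _ (hlt m hmem)
    have hc1 : c ∉ l1 := fun hmem => absurd h (ne_of_lt (hlt c hmem))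
    have hidm : L.idxOf m = l1.length := by
      rw [hxs, List.idxOf_append_of_notMem hm1, List.idxOf_cons_self]
      simp
    have hidc : L.idxOf c = l1.length + (l2.idxOf c + 1) := by
      rw [hxs, List.idxOf_append_of_notMem hc1, List.idxOf_cons_ne _ (Ne.symm hne)]
    rw [hidm, hidc]
    omega

-- per-word agreement: B's lexicographic-minimum pick equals A's max? pick
lemma pick_eq (word : List Char) :
    bestB word = PySem.List.max? (PySem.Chars.lower word)
      (fun c => (PySem.Chars.lower word).count c) := by
  cases hm : PySem.List.max? (PySem.Chars.lower word)
      (fun c => (PySem.Chars.lower word).count c) with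
  | none =>
    have h0 := (PySem.List.max?_eq_none_iff _ _).mp hm
    unfold bestB statsB
    rw [h0]
    rfl
  | some m =>
    have hmL : m ∈ PySem.Chars.lower word := PySem.List.max?_mem hm
    set L := PySem.Chars.lower word with hL
    set g : Char → Char × (Int × Int) :=
      fun c => (c, ((L.count c : Int), (L.idxOf c : Int))) with hg
    have hmS : m ∈ PySem.Set.ofList L := (PySem.Set.mem_ofList _ m).mpr hmL
    obtain ⟨u, v, huv⟩ := List.append_of_mem hmS
    have hnd : (PySem.Set.ofList L).Nodup := PySem.Set.nodup_ofList _
    rw [huv] at hnd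
    have hmu : m ∉ u := by
      rcases List.nodup_append.mp hnd with ⟨_, _, hdisj⟩
      exact fun hmem => hdisj m hmem m List.mem_cons_self rfl
    have hmv : m ∉ v := by
      rcases List.nodup_append.mp hnd with ⟨_, hnd2, _⟩
      exact (List.nodup_cons.mp hnd2).1
    have hlex : ∀ c, c ∈ u ∨ c ∈ v → LexLt (fun kv : Char × (Int × Int) => -kv.2.1)
        (fun kv => kv.2.2) (g m) (g c) := by
      intro c hc
      have hcS : c ∈ PySem.Set.ofList L := by
        rw [huv]
        rcases hc with h | h
        · exact List.mem_append.mpr (Or.inl h)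
        · exact List.mem_append.mpr (Or.inr (List.mem_cons_of_mem _ h))
      have hcL : c ∈ L := (PySem.Set.mem_ofList _ c).mp hcS
      have hne : c ≠ m := by
        rintro rfl
        rcases hc with h | h
        · exact hmu h
        · exact hmv h
      rcases key_fact L m hm c hcL hne with h | ⟨h1, h2⟩
      · exact Or.inl (by simp [hg]; omega)
      · refine Or.inr ⟨by simp [hg]; omega, by simp [hg]; omega⟩
    unfold bestB
    rw [statsB_items, ← hL, ← hg, huv]
    rw [List.map_append, List.map_cons]
    rw [min2?_split _ _ _ _ (g m)
      (fun x hx => by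
        obtain ⟨c, hc, rfl⟩ := List.mem_map.mp hx
        exact hlex c (Or.inl hc))
      (fun x hx => by
        obtain ⟨c, hc, rfl⟩ := List.mem_map.mp hx
        exact hlex c (Or.inr hc))]
    simp [hg]

-- ===== VERDICT (by name: the statement is the Claim_ definition above) =====
theorem odd_char_count_spec : Claim_equal_odd_char_count := by
  intro s _
  unfold Spec_odd_char_count odd_char_count odd_char_count_alt
  rw [main_fold]
  rw [List.filterMap_congr (fun w _ => (pick_eq w).symm)]
  rfl
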